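-- pv_equiv track=rewrite | github.com/eliottcassidy2000/math | 04-computation/trace_ocf_bridge.py | trace_per_vertex
-- ===== SOURCE A (Python) =====
-- def trace_per_vertex(T, k):
--     """Compute (A^k)[v][v] for each v. O(n^3)."""
--     n = len(T)
--     Ak = [[int(i == j) for j in range(n)] for i in range(n)]
--     for _ in range(k):
--         new = [[0]*n for _ in range(n)]
--         for i in range(n):
--             for j in range(n):
--                 for l in range(n):
--                     new[i][j] += Ak[i][l] * T[l][j]
--         Ak = new
--     return [Ak[v][v] for v in range(n)]
-- ===== SOURCE B (Python) =====
-- def trace_per_vertex(T, k):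
--     """Compute (A^k)[v][v] for each v by exponentiation by squaring: O(n^3 log k)."""
--     n = len(T)
--
--     def mul(X, Y):
--         return [[sum(X[i][l] * Y[l][j] for l in range(n)) for j in range(n)]
--                 for i in range(n)]
--
--     result = [[int(i == j) for j in range(n)] for i in range(n)]
--     base = T
--     e = k
--     while e > 0:
--         if e % 2 == 1:
--             result = mul(result, base)
--         base = mul(base, base)
--         e //= 2
--     return [result[v][v] for v in range(n)]
-- ===== Notes on version B (the rewrite author's own statement) =====
-- stated objective: faster
-- what changed: Replaces A's k successive full matrix multiplications with exponentiation by squaring (binary decomposition of k), multiplying O(log k) times instead of k times.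
import Mathlib
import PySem

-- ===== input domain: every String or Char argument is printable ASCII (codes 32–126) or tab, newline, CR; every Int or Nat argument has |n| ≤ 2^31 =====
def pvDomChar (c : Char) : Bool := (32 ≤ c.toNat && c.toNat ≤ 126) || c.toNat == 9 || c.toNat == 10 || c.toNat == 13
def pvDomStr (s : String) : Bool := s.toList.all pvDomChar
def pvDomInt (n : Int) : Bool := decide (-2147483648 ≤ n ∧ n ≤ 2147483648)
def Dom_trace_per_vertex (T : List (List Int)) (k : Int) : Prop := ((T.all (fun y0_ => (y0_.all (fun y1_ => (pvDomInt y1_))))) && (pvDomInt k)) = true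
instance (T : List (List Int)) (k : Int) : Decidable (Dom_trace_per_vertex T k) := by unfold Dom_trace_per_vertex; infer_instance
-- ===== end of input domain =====

-- B replaces A's k successive matrix multiplications with exponentiation by squaring (faster for large k).


-- ===== PORT A =====
-- M[i][j]; exact for the in-range accesses that Pre_trace_per_vertex guarantees
def pvGet (M : List (List Int)) (i j : Nat) : Int := (M.getD i []).getD j 0

-- [[int(i == j) for j in range(n)] for i in range(n)]  (built identically by A and B)
def pvIdent (n : Nat) : List (List Int) :=
  (List.range n).map (fun i => (List.range n).map (fun j => if i = j then 1 else 0))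

-- one pass of A's triple loop: new[i][j] accumulated by the innermost 'for l' loop
def pvStepA (n : Nat) (Ak T : List (List Int)) : List (List Int) :=
  (List.range n).map (fun i => (List.range n).map (fun j =>
    (List.range n).foldl (fun acc l => acc + pvGet Ak i l * pvGet T l j) 0))

def trace_per_vertex (T : List (List Int)) (k : Int) : List Int :=
  let n := T.length
  -- 'for _ in range(k)' performs max(k,0) = k.toNat iterations
  let Ak := (List.range k.toNat).foldl (fun Ak _ => pvStepA n Ak T) (pvIdent n)
  (List.range n).map (fun v => pvGet Ak v v)

-- ===== PORT B =====
-- mul(X, Y): [[sum(X[i][l]*Y[l][j] for l in range(n)) for j in range(n)] for i in range(n)]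
def pvMulB (n : Nat) (X Y : List (List Int)) : List (List Int) :=
  (List.range n).map (fun i => (List.range n).map (fun j =>
    ((List.range n).map (fun l => pvGet X i l * pvGet Y l j)).sum))

-- the 'while e > 0' squaring loop (e ≥ 0 as a Nat; Python's e //= 2 is Nat division here)
def pvPowLoop (n : Nat) (result base : List (List Int)) (e : Nat) : List (List Int) :=
  if e = 0 then result
  else pvPowLoop n (if e % 2 = 1 then pvMulB n result base else result) (pvMulB n base base) (e / 2)
  termination_by e
  decreasing_by exact Nat.div_lt_self (Nat.pos_of_ne_zero (by assumption)) (by omega)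

def trace_per_vertex_alt (T : List (List Int)) (k : Int) : List Int :=
  let n := T.length
  let r := pvPowLoop n (pvIdent n) T k.toNat
  (List.range n).map (fun v => pvGet r v v)

-- ===== PRECONDITION & SPEC =====
-- When k ≥ 1 both Pythons index T[l][j] for l, j < len(T); a row shorter than len(T) raises IndexError.
def Pre_trace_per_vertex (T : List (List Int)) (k : Int) : Prop :=
  1 ≤ k → ∀ row ∈ T, T.length ≤ row.length
instance (T : List (List Int)) (k : Int) : Decidable (Pre_trace_per_vertex T k) := by unfold Pre_trace_per_vertex; infer_instance
def pvWitness_trace_per_vertex : List (List Int) × Int := ([[1, 1], [0, 1]], 3)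

def Spec_trace_per_vertex (T : List (List Int)) (k : Int) (out : List Int) : Prop := out = trace_per_vertex_alt T k
instance (T : List (List Int)) (k : Int) (out : List Int) : Decidable (Spec_trace_per_vertex T k out) := by unfold Spec_trace_per_vertex; infer_instance

-- ===== CLAIM (what is proved, stated in full; the proofs are below) =====
def Claim_equal_trace_per_vertex : Prop := ∀ (T : List (List Int)) (k : Int), Dom_trace_per_vertex T k → Pre_trace_per_vertex T k → Spec_trace_per_vertex T k (trace_per_vertex T k)

-- ===== LEMMAS AND PROOFS =====

-- both ports' matrices, viewed as a Mathlib matrix on their top-left n×n block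
def pvToMat (n : Nat) (X : List (List Int)) : Matrix (Fin n) (Fin n) Int :=
  Matrix.of (fun i j => pvGet X i j)

theorem pvGet_ofFun (n : Nat) (f : Nat → Nat → Int) {i j : Nat} (hi : i < n) (hj : j < n) :
    pvGet ((List.range n).map (fun i => (List.range n).map (fun j => f i j))) i j = f i j := by
  simp [pvGet, List.getD_eq_getElem?_getD, hi, hj]

theorem pvFoldl_sum (g : Nat → Int) (n : Nat) :
    (List.range n).foldl (fun acc l => acc + g l) 0 = ∑ l ∈ Finset.range n, g l := by
  induction n with
  | zero => simp
  | succ m ih => rw [List.range_succ, List.foldl_append, Finset.sum_range_succ, ih]; simp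

theorem pvMapSum (g : Nat → Int) (n : Nat) :
    ((List.range n).map g).sum = ∑ l ∈ Finset.range n, g l := by
  induction n with
  | zero => simp
  | succ m ih => rw [List.range_succ, List.map_append, List.sum_append, Finset.sum_range_succ, ih]; simp

theorem pvToMat_ident (n : Nat) : pvToMat n (pvIdent n) = 1 := by
  ext i j
  rw [pvToMat, Matrix.of_apply, pvIdent, pvGet_ofFun n _ i.isLt j.isLt, Matrix.one_apply]
  by_cases h : (i : Nat) = (j : Nat) <;> simp [h, Fin.ext_iff]

theorem pvToMat_stepA (n : Nat) (X Y : List (List Int)) :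
    pvToMat n (pvStepA n X Y) = pvToMat n X * pvToMat n Y := by
  ext i j
  rw [pvToMat, Matrix.of_apply, pvStepA, pvGet_ofFun n _ i.isLt j.isLt, pvFoldl_sum,
    Matrix.mul_apply, ← Fin.sum_univ_eq_sum_range]
  rfl

theorem pvToMat_mulB (n : Nat) (X Y : List (List Int)) :
    pvToMat n (pvMulB n X Y) = pvToMat n X * pvToMat n Y := by
  ext i j
  rw [pvToMat, Matrix.of_apply, pvMulB, pvGet_ofFun n _ i.isLt j.isLt, pvMapSum,
    Matrix.mul_apply, ← Fin.sum_univ_eq_sum_range]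
  rfl

theorem pvToMat_foldA (n : Nat) (T : List (List Int)) (m : Nat) :
    pvToMat n ((List.range m).foldl (fun Ak _ => pvStepA n Ak T) (pvIdent n))
      = (pvToMat n T) ^ m := by
  induction m with
  | zero => simpa using pvToMat_ident n
  | succ p ih =>
      rw [List.range_succ, List.foldl_append, List.foldl_cons, List.foldl_nil,
        pvToMat_stepA, ih, pow_succ]

theorem pvToMat_powLoop (n : Nat) (r b : List (List Int)) (e : Nat) :
    pvToMat n (pvPowLoop n r b e) = pvToMat n r * (pvToMat n b) ^ e := by
  induction e using Nat.strong_induction_on generalizing r b with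
  | _ e ih =>
    rw [pvPowLoop]
    by_cases he : e = 0
    · simp [he]
    · rw [if_neg he, ih (e / 2) (Nat.div_lt_self (Nat.pos_of_ne_zero he) (by omega)),
        pvToMat_mulB]
      by_cases ho : e % 2 = 1
      · rw [if_pos ho, pvToMat_mulB]
        have : e = 2 * (e / 2) + 1 := by omega
        rw [mul_assoc]
        congr 1
        rw [← sq, ← pow_mul, ← pow_succ']
        congr 1; omega
      · rw [if_neg ho]
        congr 1
        rw [← sq, ← pow_mul]
        congr 1; omega

-- ===== VERDICT (by name: the statement is the Claim_ definition above) =====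
theorem trace_per_vertex_spec : Claim_equal_trace_per_vertex := by
  intro T k _ _
  unfold Spec_trace_per_vertex trace_per_vertex trace_per_vertex_alt
  have h : pvToMat T.length ((List.range k.toNat).foldl (fun Ak _ => pvStepA T.length Ak T) (pvIdent T.length))
      = pvToMat T.length (pvPowLoop T.length (pvIdent T.length) T k.toNat) := by
    rw [pvToMat_foldA, pvToMat_powLoop, pvToMat_ident, one_mul]
  refine List.map_congr_left (fun v hv => ?_)
  have hvn : v < T.length := List.mem_range.mp hv
  have := congrFun (congrFun h ⟨v, hvn⟩) ⟨v, hvn⟩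
  simpa [pvToMat] using this
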